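-- pv_equiv track=rewrite | github.com/AliceMNT/AALG_15766_S08 | sumaListaimparPar.py | sumaresta
-- ===== SOURCE A (Python) =====
-- def sumaresta(arr, x):
--     if x == 0:
--         if arr[0] % 2 == 0:
--             return arr[0]
--         else:
--             return -arr[0]
--     else:
--         if arr[x] % 2 == 0:
--             return arr[x] + sumaresta(arr, x - 1)
--         else:
--             return -arr[x] + sumaresta(arr, x - 1)
-- ===== SOURCE B (Python) =====
-- def sumaresta(arr, x):
--     total = 0
--     for i in range(x + 1):
--         v = arr[i]
--         total += v if v % 2 == 0 else -v
--     return total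
-- ===== Notes on version B (the rewrite author's own statement) =====
-- stated objective: simpler
-- what changed: Replaces the recursion over the prefix with a single iterative loop and an accumulator (total += arr[i] if even else -arr[i]); no recursion, no call stack.
-- crash fix: For x < 0, A recurses downward forever past the base case and raises (IndexError or RecursionError), while B's empty range(x+1) makes it return 0. — e.g. on sumaresta([1], -1): A raises IndexError, B returns 0
import Mathlib
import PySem

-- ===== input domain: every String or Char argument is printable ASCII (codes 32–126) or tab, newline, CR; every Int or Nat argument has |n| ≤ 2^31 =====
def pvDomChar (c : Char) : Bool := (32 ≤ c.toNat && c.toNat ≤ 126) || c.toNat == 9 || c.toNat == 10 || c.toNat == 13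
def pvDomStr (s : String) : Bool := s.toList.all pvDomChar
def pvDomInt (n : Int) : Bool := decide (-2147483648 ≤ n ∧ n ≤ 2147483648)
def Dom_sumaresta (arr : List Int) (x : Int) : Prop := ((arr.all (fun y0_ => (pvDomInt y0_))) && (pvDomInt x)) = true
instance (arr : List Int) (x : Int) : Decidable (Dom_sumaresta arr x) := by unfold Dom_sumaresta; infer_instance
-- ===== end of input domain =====

-- B replaces A's recursion with an iterative accumulator loop over range(x+1); same values, simpler shape.

-- ===== PORT A =====
-- A recurses on x down to 0; ported as structural recursion on the fuel x.toNat
-- (for x < 0 Python never reaches the base case and raises — excluded by Pre_).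
def sumarestaFuel (arr : List Int) : Nat → Int
  | 0 =>
      let v := PySem.List.pyGetD arr 0 0
      if v % 2 == 0 then v else -v
  | n + 1 =>
      let v := PySem.List.pyGetD arr ((n : Int) + 1) 0
      if v % 2 == 0 then v + sumarestaFuel arr n else -v + sumarestaFuel arr n

def sumaresta (arr : List Int) (x : Int) : Int :=
  if x < 0 then 0 else sumarestaFuel arr x.toNat

-- ===== PORT B =====
def sumaresta_alt (arr : List Int) (x : Int) : Int :=
  (PySem.List.pyRange 0 (x + 1) 1).foldl
    (fun total i =>
      let v := PySem.List.pyGetD arr i 0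
      total + (if v % 2 == 0 then v else -v)) 0

-- ===== PRECONDITION & SPEC =====
-- Pre_: exactly the inputs on which A returns normally (arr[0..x] all valid, x ≥ 0);
-- for x < 0 or x ≥ len(arr) the Python A raises.
def Pre_sumaresta (arr : List Int) (x : Int) : Prop := 0 ≤ x ∧ x < arr.length
instance (arr : List Int) (x : Int) : Decidable (Pre_sumaresta arr x) := by unfold Pre_sumaresta; infer_instance

def pvWitness_sumaresta : List Int × Int := ([2, 3, 5], 1)

-- For x < 0, A recurses downward past the base case and raises (IndexError/RecursionError); B's empty range returns 0.
def Raises_sumaresta (arr : List Int) (x : Int) : Prop := x < 0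
instance (arr : List Int) (x : Int) : Decidable (Raises_sumaresta arr x) := by unfold Raises_sumaresta; infer_instance
def pvRaiseWitness_sumaresta : List Int × Int := ([1], -1)
def pvRaiseWitnessOut_sumaresta : Int := 0

def Spec_sumaresta (arr : List Int) (x : Int) (out : Int) : Prop := out = sumaresta_alt arr x
instance (arr : List Int) (x : Int) (out : Int) : Decidable (Spec_sumaresta arr x out) := by unfold Spec_sumaresta; infer_instance

-- ===== CLAIM (what is proved, stated in full; the proofs are below) =====
def Claim_equal_sumaresta : Prop := ∀ (arr : List Int) (x : Int), Dom_sumaresta arr x → Pre_sumaresta arr x → Spec_sumaresta arr x (sumaresta arr x)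

def Claim_raises_sumaresta : Prop := (∀ (arr : List Int) (x : Int), Dom_sumaresta arr x → Raises_sumaresta arr x → ¬ Pre_sumaresta arr x) ∧ (Dom_sumaresta (pvRaiseWitness_sumaresta.1) (pvRaiseWitness_sumaresta.2) ∧ Raises_sumaresta (pvRaiseWitness_sumaresta.1) (pvRaiseWitness_sumaresta.2) ∧ sumaresta_alt (pvRaiseWitness_sumaresta.1) (pvRaiseWitness_sumaresta.2) = pvRaiseWitnessOut_sumaresta)

-- ===== LEMMAS AND PROOFS =====

theorem sumaresta_fuel_eq_alt (arr : List Int) (n : Nat) :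
    sumarestaFuel arr n = sumaresta_alt arr (n : Int) := by
  induction n with
  | zero =>
      simp only [sumaresta_alt, sumarestaFuel, Nat.cast_zero, zero_add]
      rw [show PySem.List.pyRange 0 1 1 = [0] from by decide]
      simp
  | succ n ih =>
      have h : PySem.List.pyRange 0 (((n : Int) + 1) + 1) 1
          = PySem.List.pyRange 0 ((n : Int) + 1) 1 ++ [(n : Int) + 1] :=
        PySem.List.pyRange_one_succ_right (by positivity)
      unfold sumaresta_alt
      push_cast
      rw [h, List.foldl_append]
      simp only [List.foldl]
      rw [show ((n : Int) + 1) = ((n + 1 : Nat) : Int) by push_cast; ring] at *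
      simp [sumarestaFuel, ih, sumaresta_alt]
      split <;> ring

-- ===== VERDICT (by name: the statement is the Claim_ definition above) =====
theorem sumaresta_spec : Claim_equal_sumaresta := by
  intro arr x _ hpre
  obtain ⟨h0, h1⟩ := hpre
  unfold Spec_sumaresta sumaresta
  rw [if_neg (by omega : ¬ x < 0)]
  have := sumaresta_fuel_eq_alt arr x.toNat
  rwa [Int.toNat_of_nonneg h0] at this

@[simp] theorem sumaresta_raises : Claim_raises_sumaresta := by
  unfold Claim_raises_sumaresta
  exact ⟨fun arr x _ hr hp => absurd hp.1 (not_le.mpr hr), by decide⟩
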